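-- pv_equiv track=rewrite | github.com/WilliamHuang2022/spider4news | funcs.py | sep_list
-- ===== SOURCE A (Python) =====
-- def sep_list(time_list,title_list,url_list,summary_list):
--     # 将几天的内容时间戳分别截断放入大列表
--     s=0
--     times=[]
--     titles=[]
--     urls=[]
--     summarys=[]
--     n=min(len(time_list),len(title_list))#按短的来作为标准长度
--     time_list=time_list[:n]
--     title_list=title_list[:n]
--     url_list=url_list[:n]
--     summary_list=summary_list[:n]
--     for i in range(len(time_list)-1):
--         if time_list[i]<time_list[i+1]:
--             times.append(time_list[s:i+1])
--             titles.append(title_list[s:i+1])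
--             urls.append(url_list[s:i+1])
--             summarys.append(summary_list[s:i+1])
--             s=i+1
--     times.append(time_list[s:])
--     titles.append(title_list[s:])
--     urls.append(url_list[s:])
--     summarys.append(summary_list[s:])
--     return times,titles,urls,summarys
-- ===== SOURCE B (Python) =====
-- def sep_list(time_list, title_list, url_list, summary_list):
--     # Group elements into a dict keyed by segment label, then read the groups off in order.
--     n = min(len(time_list), len(title_list))
--     label = []
--     seg = 0
--     for j in range(n):
--         if j and time_list[j - 1] < time_list[j]:
--             seg += 1
--         label.append(seg)
--
--     def group(lst):
--         groups = {}
--         for j, x in enumerate(lst[:n]):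
--             groups.setdefault(label[j], []).append(x)
--         return [groups.get(m, []) for m in range(seg + 1)]
--
--     return group(time_list), group(title_list), group(url_list), group(summary_list)
-- ===== Notes on version B (the rewrite author's own statement) =====
-- stated objective: alternative
-- what changed: Replaces A's stateful slice-on-increase loop by a scatter/grouping algorithm: one pass labels every index with its segment number, then each list's elements are distributed element-by-element into a dict of segment buckets (setdefault/append) and the buckets are read off in label order - no slicing and no running start index at all.
import Mathlib
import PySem

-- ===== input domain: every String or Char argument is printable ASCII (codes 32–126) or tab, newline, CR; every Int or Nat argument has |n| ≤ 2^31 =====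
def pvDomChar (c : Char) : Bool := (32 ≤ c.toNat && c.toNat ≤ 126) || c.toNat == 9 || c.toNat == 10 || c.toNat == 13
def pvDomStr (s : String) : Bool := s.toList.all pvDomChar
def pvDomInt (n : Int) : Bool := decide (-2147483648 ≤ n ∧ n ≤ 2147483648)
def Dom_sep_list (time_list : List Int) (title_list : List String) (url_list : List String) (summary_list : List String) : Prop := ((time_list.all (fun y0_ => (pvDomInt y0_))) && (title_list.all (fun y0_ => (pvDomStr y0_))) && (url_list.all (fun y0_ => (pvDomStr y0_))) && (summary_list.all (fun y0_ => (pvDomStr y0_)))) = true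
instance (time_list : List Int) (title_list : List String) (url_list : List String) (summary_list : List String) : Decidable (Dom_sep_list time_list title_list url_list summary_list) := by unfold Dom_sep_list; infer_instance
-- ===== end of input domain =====

-- B replaces A's slice-on-increase loop by labelling each index with its segment number and
-- scattering elements into a dict of segment buckets (alternative algorithm, same cost).

-- ===== PORT A =====
-- literal transliteration of A: truncate to n, one fold carrying (s, times, titles, urls, summarys)
def sep_list (time_list : List Int) (title_list : List String) (url_list : List String) (summary_list : List String) : List (List Int) × List (List String) × List (List String) × List (List String) :=
  let n : Int := min (time_list.length : Int) (title_list.length : Int)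
  let tl := PySem.List.slice time_list none (some n)
  let til := PySem.List.slice title_list none (some n)
  let ul := PySem.List.slice url_list none (some n)
  let sl := PySem.List.slice summary_list none (some n)
  let st := (PySem.List.pyRange 0 ((tl.length : Int) - 1) 1).foldl
    (fun (st : Int × List (List Int) × List (List String) × List (List String) × List (List String)) i =>
      if PySem.List.pyGetD tl i 0 < PySem.List.pyGetD tl (i + 1) 0 then
        (i + 1,
         st.2.1 ++ [PySem.List.slice tl (some st.1) (some (i + 1))],
         st.2.2.1 ++ [PySem.List.slice til (some st.1) (some (i + 1))],
         st.2.2.2.1 ++ [PySem.List.slice ul (some st.1) (some (i + 1))],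
         st.2.2.2.2 ++ [PySem.List.slice sl (some st.1) (some (i + 1))])
      else st)
    ((0 : Int), ([] : List (List Int)), ([] : List (List String)), ([] : List (List String)), ([] : List (List String)))
  (st.2.1 ++ [PySem.List.slice tl (some st.1) none],
   st.2.2.1 ++ [PySem.List.slice til (some st.1) none],
   st.2.2.2.1 ++ [PySem.List.slice ul (some st.1) none],
   st.2.2.2.2 ++ [PySem.List.slice sl (some st.1) none])

-- ===== PORT B =====
-- Source B's label loop: for j in range(n): if j and time_list[j-1] < time_list[j]: seg += 1; label.append(seg)
def pvLabelLoop (time_list : List Int) (n : Nat) : Int × List Int :=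
  (PySem.List.pyRange 0 (n : Int) 1).foldl
    (fun (st : Int × List Int) j =>
      let seg := if 0 < j ∧ PySem.List.pyGetD time_list (j - 1) 0 < PySem.List.pyGetD time_list j 0 then st.1 + 1 else st.1
      (seg, st.2 ++ [seg]))
    (0, [])

-- Source B's group: scatter lst[:n] into a dict of buckets keyed by label[j]
-- (groups.setdefault(label[j], []).append(x) is exactly Dict.modify label[j] [] (· ++ [x])),
-- then read the buckets off with groups.get(m, []) for m in range(seg + 1)
def pvGroup {α : Type} (label : List Int) (seg : Int) (n : Nat) (lst : List α) : List (List α) :=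
  let groups : PySem.Dict Int (List α) :=
    (PySem.List.enumerate (PySem.List.slice lst none (some (n : Int))) 0).foldl
      (fun d p => d.modify (PySem.List.pyGetD label p.1 0) [] (fun g => g ++ [p.2])) PySem.Dict.empty
  (PySem.List.pyRange 0 (seg + 1) 1).map (fun m => groups.getD m [])

def sep_list_alt (time_list : List Int) (title_list : List String) (url_list : List String) (summary_list : List String) : List (List Int) × List (List String) × List (List String) × List (List String) :=
  let n : Nat := min time_list.length title_list.length
  let sl := pvLabelLoop time_list n
  (pvGroup sl.2 sl.1 n time_list, pvGroup sl.2 sl.1 n title_list,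
   pvGroup sl.2 sl.1 n url_list, pvGroup sl.2 sl.1 n summary_list)

-- ===== PRECONDITION & SPEC =====
def Spec_sep_list (time_list : List Int) (title_list : List String) (url_list : List String) (summary_list : List String) (out : List (List Int) × List (List String) × List (List String) × List (List String)) : Prop := out = sep_list_alt time_list title_list url_list summary_list
instance (time_list : List Int) (title_list : List String) (url_list : List String) (summary_list : List String) (out : List (List Int) × List (List String) × List (List String) × List (List String)) : Decidable (Spec_sep_list time_list title_list url_list summary_list out) := by unfold Spec_sep_list; infer_instance

-- ===== CLAIM (what is proved, stated in full; the proofs are below) =====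
def Claim_equal_sep_list : Prop := ∀ (time_list : List Int) (title_list : List String) (url_list : List String) (summary_list : List String), Dom_sep_list time_list title_list url_list summary_list → Spec_sep_list time_list title_list url_list summary_list (sep_list time_list title_list url_list summary_list)

-- ===== LEMMAS AND PROOFS =====

-- the increase predicate P i = (time_list[i] < time_list[i+1]) read on the untruncated list
def pvP (time_list : List Int) (i : Nat) : Bool :=
  decide (PySem.List.pyGetD time_list (i : Int) 0 < PySem.List.pyGetD time_list ((i : Int) + 1) 0)

-- segment label of index j: number of increases strictly before j
def pvLabelN (time_list : List Int) (j : Nat) : Nat :=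
  (List.range j).countP (pvP time_list)

-- the Nat cut list 0 :: (increase points + 1) ++ [n]
def pvCutsN (time_list : List Int) (n : Nat) : List Nat :=
  0 :: (((List.range (n - 1)).filter (pvP time_list)).map (· + 1) ++ [n])

-- segments of lst described by consecutive cut pairs (proof-side characterisation shared by both ports)
def pvSegs {α : Type} (cuts : List Int) (lst : List α) : List (List α) :=
  (cuts.zip cuts.tail).map (fun p => PySem.List.slice lst (some p.1) (some p.2))

-- A-side cut list in Int form, as produced by A's loop (characterised by pvLoopInv below)
def pvCuts (tt : List Int) (k : Int) : List Int :=
  0 :: ((PySem.List.pyRange 0 k 1).filter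
        (fun i => decide (PySem.List.pyGetD tt i 0 < PySem.List.pyGetD tt (i + 1) 0))).map (· + 1)

lemma pvCuts_ne_nil (tt : List Int) (k : Int) : pvCuts tt k ≠ [] := by
  simp [pvCuts]

lemma zip_tail_append (a : Int) (c : List Int) (x d : Int) :
    ((a :: c) ++ [x]).zip (((a :: c) ++ [x]).tail)
      = (a :: c).zip c ++ [((a :: c).getLastD d, x)] := by
  induction c generalizing a d with
  | nil => simp
  | cons b rest' ih =>
    have H := ih b a
    simp only [List.cons_append, List.tail_cons, List.zip_cons_cons, List.getLastD_cons] at H ⊢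
    rw [H]

lemma segs_append {α : Type} (lst : List α) (c : List Int) (x : Int) (h : c ≠ []) :
    pvSegs (c ++ [x]) lst
      = pvSegs c lst ++ [PySem.List.slice lst (some (c.getLastD 0)) (some x)] := by
  obtain ⟨a, c', rfl⟩ : ∃ a c', c = a :: c' := by
    cases c with
    | nil => exact absurd rfl h
    | cons a c' => exact ⟨a, c', rfl⟩
  simp only [pvSegs]
  rw [zip_tail_append a c' x 0, List.map_append]
  rfl

lemma cuts_getLastD_nonneg (tt : List Int) (k : Int) : 0 ≤ (pvCuts tt k).getLastD 0 := by
  have hall : ∀ x ∈ pvCuts tt k, 0 ≤ x := by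
    intro x hx
    simp only [pvCuts, List.mem_cons, List.mem_map, List.mem_filter] at hx
    rcases hx with rfl | ⟨i, ⟨hi, _⟩, rfl⟩
    · exact le_refl 0
    · have := (PySem.List.mem_pyRange_one.mp hi).1; omega
  have hmem : (pvCuts tt k).getLastD 0 ∈ 0 :: pvCuts tt k := List.getLastD_mem_cons
  rcases List.mem_cons.mp hmem with h0 | hm
  · exact le_of_eq h0.symm
  · exact hall _ hm

-- loop invariant: A's fold over range(0,k) yields the last cut and the segments of pvCuts
lemma pvLoopInv (tt : List Int) {α β γ δ : Type}
    (ta : List α) (tb : List β) (tc : List γ) (td : List δ) (k : Nat) :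
    (PySem.List.pyRange 0 (k : Int) 1).foldl
      (fun (st : Int × List (List α) × List (List β) × List (List γ) × List (List δ)) i =>
        if PySem.List.pyGetD tt i 0 < PySem.List.pyGetD tt (i + 1) 0 then
          (i + 1,
           st.2.1 ++ [PySem.List.slice ta (some st.1) (some (i + 1))],
           st.2.2.1 ++ [PySem.List.slice tb (some st.1) (some (i + 1))],
           st.2.2.2.1 ++ [PySem.List.slice tc (some st.1) (some (i + 1))],
           st.2.2.2.2 ++ [PySem.List.slice td (some st.1) (some (i + 1))])
        else st)
      ((0 : Int), [], [], [], [])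
    = ((pvCuts tt (k : Int)).getLastD 0,
       pvSegs (pvCuts tt (k : Int)) ta, pvSegs (pvCuts tt (k : Int)) tb,
       pvSegs (pvCuts tt (k : Int)) tc, pvSegs (pvCuts tt (k : Int)) td) := by
  induction k with
  | zero =>
    simp [PySem.List.pyRange_one_eq_nil, pvCuts, pvSegs]
  | succ m ih =>
    have hcast : ((m + 1 : Nat) : Int) = (m : Int) + 1 := by push_cast; ring
    rw [hcast, PySem.List.pyRange_one_succ_right (by positivity), List.foldl_append, ih]
    simp only [List.foldl_cons, List.foldl_nil]
    by_cases hP : PySem.List.pyGetD tt (m : Int) 0 < PySem.List.pyGetD tt ((m : Int) + 1) 0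
    · have hP' := hP
      simp at hP'
      have hcuts : pvCuts tt ((m : Int) + 1) = pvCuts tt (m : Int) ++ [(m : Int) + 1] := by
        simp [pvCuts, PySem.List.pyRange_one_succ_right (show (0:Int) ≤ (m : Int) by positivity),
              List.filter_append, hP']
      rw [if_pos hP, hcuts,
          segs_append ta _ _ (pvCuts_ne_nil tt (m : Int)),
          segs_append tb _ _ (pvCuts_ne_nil tt (m : Int)),
          segs_append tc _ _ (pvCuts_ne_nil tt (m : Int)),
          segs_append td _ _ (pvCuts_ne_nil tt (m : Int)),
          List.getLastD_concat]
    · have hP' := hP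
      simp at hP'
      have hcuts : pvCuts tt ((m : Int) + 1) = pvCuts tt (m : Int) := by
        simp [pvCuts, PySem.List.pyRange_one_succ_right (show (0:Int) ≤ (m : Int) by positivity),
              List.filter_append, hP']
      rw [if_neg hP, hcuts]

-- the trailing slice lst[s:] equals lst[s:n] when 0 ≤ s and lst has length ≤ n
lemma slice_from_eq_slice_to {α : Type} (lst : List α) (s : Int) (n : Nat)
    (hs : 0 ≤ s) (hlen : lst.length ≤ n) :
    PySem.List.slice lst (some s) = PySem.List.slice lst (some s) (some (n : Int)) := by
  rw [PySem.List.slice_from lst hs, PySem.List.slice_toNat lst hs (by positivity)]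
  rw [List.take_of_length_le (by simp; omega)]

-- A's result = pvSegs of the full cut list, per component  (lst below are the TRUNCATED lists)
lemma sep_list_eq_segs (time_list : List Int) (title_list : List String)
    (url_list : List String) (summary_list : List String) :
    sep_list time_list title_list url_list summary_list
      = (let n : Nat := min time_list.length title_list.length
         let t := PySem.List.slice time_list none (some (n : Int))
         let cutsFull := pvCuts t (((n - 1 : Nat)) : Int) ++ [(n : Int)]
         (pvSegs cutsFull t,
          pvSegs cutsFull (PySem.List.slice title_list none (some (n : Int))),
          pvSegs cutsFull (PySem.List.slice url_list none (some (n : Int))),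
          pvSegs cutsFull (PySem.List.slice summary_list none (some (n : Int))))) := by
  unfold sep_list
  dsimp only
  set n : Nat := min time_list.length title_list.length with hn
  have hnint : min (time_list.length : Int) (title_list.length : Int) = (n : Int) := by
    rw [hn]; push_cast; rfl
  rw [hnint]
  set t := PySem.List.slice time_list none (some (n : Int)) with ht
  set til := PySem.List.slice title_list none (some (n : Int)) with htil
  set ul := PySem.List.slice url_list none (some (n : Int)) with hul
  set sl := PySem.List.slice summary_list none (some (n : Int)) with hsl
  have hlt : t.length = n := by
    rw [ht, PySem.List.slice_to_natCast]; simp [hn]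
  rw [hlt]
  have hr : PySem.List.pyRange 0 ((n : Int) - 1) 1
      = PySem.List.pyRange 0 (((n - 1 : Nat)) : Int) 1 := by
    rw [PySem.List.pyRange_one, PySem.List.pyRange_one]; congr 2; omega
  rw [hr, pvLoopInv t t til ul sl (n - 1)]
  have hs0 : 0 ≤ (pvCuts t (((n - 1 : Nat)) : Int)).getLastD 0 :=
    cuts_getLastD_nonneg t _
  have hseg : ∀ {α : Type} (lst : List α), lst.length ≤ n →
      pvSegs (pvCuts t (((n - 1 : Nat)) : Int)) lst
        ++ [PySem.List.slice lst (some ((pvCuts t (((n - 1 : Nat)) : Int)).getLastD 0))]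
      = pvSegs (pvCuts t (((n - 1 : Nat)) : Int) ++ [(n : Int)]) lst := by
    intro α lst hlen
    rw [segs_append lst _ _ (pvCuts_ne_nil t _), slice_from_eq_slice_to lst _ n hs0 hlen]
  have hltil : til.length ≤ n := by rw [htil, PySem.List.slice_to_natCast]; simp
  have hlul : ul.length ≤ n := by rw [hul, PySem.List.slice_to_natCast]; simp
  have hlsl : sl.length ≤ n := by rw [hsl, PySem.List.slice_to_natCast]; simp
  simp only [Prod.mk.injEq]
  exact ⟨hseg t (le_of_eq hlt), hseg til hltil, hseg ul hlul, hseg sl hlsl⟩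

-- ---- B side ----

-- the label loop computes (number of increases in range(n-1), labels of 0..n-1)
lemma pvLabelLoop_eq (time_list : List Int) (n : Nat) :
    pvLabelLoop time_list n
      = ((((List.range (n - 1)).filter (pvP time_list)).length : Int),
         (List.range n).map (fun j => (pvLabelN time_list j : Int))) := by
  induction n with
  | zero => simp [pvLabelLoop, PySem.List.pyRange_one_eq_nil]
  | succ m ih =>
    unfold pvLabelLoop at ih ⊢
    have hcast : ((m + 1 : Nat) : Int) = (m : Int) + 1 := by push_cast; ring
    rw [hcast, PySem.List.pyRange_one_succ_right (by positivity), List.foldl_append, ih]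
    simp only [List.foldl_cons, List.foldl_nil]
    rcases Nat.eq_zero_or_pos m with hm | hm
    · subst hm
      simp [pvLabelN]
    · have hm1 : ((m : Int) - 1) = ((m - 1 : Nat) : Int) := by omega
      have hcond : (0 < (m : Int) ∧
          PySem.List.pyGetD time_list ((m : Int) - 1) 0 < PySem.List.pyGetD time_list (m : Int) 0)
          ↔ pvP time_list (m - 1) = true := by
        rw [hm1, pvP]
        have : ((m - 1 : Nat) : Int) + 1 = (m : Int) := by omega
        rw [this]
        simp
        omega
      have hrm : List.range m = List.range (m - 1) ++ [m - 1] := by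
        conv_lhs => rw [show m = (m - 1) + 1 by omega, List.range_succ]
      have hlabm : pvLabelN time_list m
          = ((List.range (m - 1)).filter (pvP time_list)).length
            + (if pvP time_list (m - 1) = true then 1 else 0) := by
        rw [pvLabelN, hrm, List.countP_append, List.countP_eq_length_filter]
        simp [List.countP_cons]
      have hrsucc : List.range (m + 1) = List.range m ++ [m] := List.range_succ
      by_cases hP : pvP time_list (m - 1) = true
      · rw [if_pos (hcond.mpr hP)]
        have hfil : (List.range (m + 1 - 1)).filter (pvP time_list)
            = (List.range (m - 1)).filter (pvP time_list) ++ [m - 1] := by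
          simp only [Nat.add_sub_cancel]
          rw [hrm, List.filter_append]
          simp [hP]
        rw [hfil]
        simp only [hrsucc, List.map_append, List.map_cons, List.map_nil, List.length_append,
          List.length_cons, List.length_nil, Prod.mk.injEq]
        constructor
        · push_cast; ring
        · congr 1
          have : (pvLabelN time_list m : Int)
              = (((List.range (m - 1)).filter (pvP time_list)).length : Int) + 1 := by
            rw [hlabm, if_pos hP]; push_cast; ring
          rw [this]
      · rw [if_neg (fun h => hP (hcond.mp h))]
        have hfil : (List.range (m + 1 - 1)).filter (pvP time_list)
            = (List.range (m - 1)).filter (pvP time_list) := by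
          simp only [Nat.add_sub_cancel]
          rw [hrm, List.filter_append]
          simp [hP]
        rw [hfil]
        simp only [hrsucc, List.map_append, List.map_cons, List.map_nil, Prod.mk.injEq]
        refine ⟨trivial, ?_⟩
        congr 1
        have : (pvLabelN time_list m : Int)
            = (((List.range (m - 1)).filter (pvP time_list)).length : Int) := by
          rw [hlabm, if_neg hP]; push_cast; ring
        rw [this]

-- the full cut list of A, in Int form, is the Nat cut list cast
lemma cutsFull_eq_cast (time_list : List Int) (n : Nat)
    (t : List Int) (ht : t = PySem.List.slice time_list none (some (n : Int))) :
    pvCuts t (((n - 1 : Nat)) : Int) ++ [(n : Int)]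
      = (pvCutsN time_list n).map (fun c : Nat => (c : Int)) := by
  have hget : ∀ i : Nat, i < n →
      PySem.List.pyGetD t (i : Int) 0 = PySem.List.pyGetD time_list (i : Int) 0 := by
    intro i hi
    rw [ht, PySem.List.slice_to_natCast, PySem.List.pyGetD_natCast, PySem.List.pyGetD_natCast,
        List.getD_eq_getElem?_getD, List.getD_eq_getElem?_getD, List.getElem?_take_of_lt hi]
  simp only [pvCuts, pvCutsN, PySem.List.pyRange_zero_natCast, List.filter_map]
  have hfil : ((List.range (n - 1)).filter
        ((fun i => decide (PySem.List.pyGetD t i 0 < PySem.List.pyGetD t (i + 1) 0))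
          ∘ (fun k : Nat => (k : Int))))
      = (List.range (n - 1)).filter (pvP time_list) := by
    apply List.filter_congr
    intro i hi
    have hi' : i < n - 1 := List.mem_range.mp hi
    simp only [Function.comp_apply, pvP]
    have h1 : ((i : Int) + 1) = ((i + 1 : Nat) : Int) := by push_cast; ring
    rw [h1, hget i (by omega), hget (i + 1) (by omega), ← h1]
  rw [hfil]
  simp only [List.map_cons, List.map_append, List.map_map, List.map_nil, List.cons_append]
  congr 3

-- (range N) below j is range j
lemma filter_range_lt (N j : Nat) (h : j ≤ N) :
    (List.range N).filter (fun x => decide (x < j)) = List.range j := by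
  have h2 : N = j + (N - j) := by omega
  rw [h2, List.range_add, List.filter_append]
  have e1 : (List.range j).filter (fun x => decide (x < j)) = List.range j := by
    apply List.filter_eq_self.mpr; intro a ha; simp [List.mem_range.mp ha]
  have e2 : ((List.range (N - j)).map (j + ·)).filter (fun x => decide (x < j)) = [] := by
    apply List.filter_eq_nil_iff.mpr; intro a ha; simp at ha ⊢; omega
  rw [e1, e2, List.append_nil]

-- in a strictly sorted list, L[q] < j iff at least q+1 elements are below j
lemma sorted_getElem_lt_iff : ∀ (L : List Nat) (q j : Nat), L.Pairwise (· < ·) → q < L.length →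
    (L[q]! < j ↔ q + 1 ≤ (L.filter (fun x => decide (x < j))).length) := by
  intro L
  induction L with
  | nil => intro q j _ hq; simp at hq
  | cons x xs ih =>
    intro q j hL hq
    have hx : ∀ y ∈ xs, x < y := (List.pairwise_cons.mp hL).1
    have hxs := (List.pairwise_cons.mp hL).2
    cases q with
    | zero =>
      rw [getElem!_pos (x :: xs) 0 hq]
      simp only [List.getElem_cons_zero]
      constructor
      · intro h
        rw [List.filter_cons_of_pos (by simp [h])]
        simp
      · intro h
        by_contra hnot
        push_neg at hnot
        have hempty : (x :: xs).filter (fun y => decide (y < j)) = [] := by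
          apply List.filter_eq_nil_iff.mpr
          intro y hy
          simp only [decide_eq_true_eq, not_lt]
          rcases List.mem_cons.mp hy with rfl | hy'
          · omega
          · have := hx y hy'; omega
        rw [hempty] at h
        simp at h
    | succ q' =>
      have hq' : q' < xs.length := by simp at hq; omega
      rw [getElem!_pos (x :: xs) (q' + 1) hq]
      simp only [List.getElem_cons_succ]
      rw [← getElem!_pos xs q' hq']
      by_cases hxj : x < j
      · rw [List.filter_cons_of_pos (by simp [hxj])]
        simp only [List.length_cons]
        have := ih q' j hxs hq'
        omega
      · have hxq : x < xs[q']! := by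
          rw [getElem!_pos xs q' hq']
          exact hx _ (List.getElem_mem hq')
        have hempty : xs.filter (fun y => decide (y < j)) = [] := by
          apply List.filter_eq_nil_iff.mpr
          intro y hy
          simp only [decide_eq_true_eq, not_lt]
          have := hx y hy; omega
        rw [List.filter_cons_of_neg (by simp [hxj]), hempty]
        constructor
        · intro h; omega
        · intro h; simp at h
      
-- crux: label j = m  ↔  cutsN[m] ≤ j < cutsN[m+1]   (j < n, m < number of segments)
lemma label_iff_cuts (time_list : List Int) (n : Nat) (m j : Nat)
    (hm : m < ((List.range (n - 1)).filter (pvP time_list)).length + 1) (hj : j < n) :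
    pvLabelN time_list j = m ↔
      (pvCutsN time_list n)[m]! ≤ j ∧ j < (pvCutsN time_list n)[m + 1]! := by
  set L := (List.range (n - 1)).filter (pvP time_list) with hL
  have hLs : L.Pairwise (· < ·) := List.Pairwise.filter _ List.pairwise_lt_range
  have hcuts : pvCutsN time_list n = 0 :: (L.map (· + 1) ++ [n]) := by rw [pvCutsN, hL]
  have hc0 : (pvCutsN time_list n)[0]! = 0 := by rw [hcuts]; rfl
  have hcq : ∀ q, q < L.length → (pvCutsN time_list n)[q + 1]! = L[q]! + 1 := by
    intro q hq
    rw [hcuts, getElem!_pos (0 :: (List.map (· + 1) L ++ [n])) (q + 1) (by simp; omega)]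
    simp only [List.getElem_cons_succ]
    rw [List.getElem_append_left (by simp [hq]), List.getElem_map, getElem!_pos L q hq]
  have hctop : (pvCutsN time_list n)[L.length + 1]! = n := by
    rw [hcuts, getElem!_pos (0 :: (List.map (· + 1) L ++ [n])) (L.length + 1) (by simp)]
    simp only [List.getElem_cons_succ]
    rw [List.getElem_append_right (by simp)]
    simp
  have hlab_le : pvLabelN time_list j ≤ L.length := by
    rw [pvLabelN, hL, List.countP_eq_length_filter]
    exact List.Sublist.length_le
      (List.Sublist.filter _ (List.range_sublist.mpr (by omega)))
  have hlab_eq : pvLabelN time_list j = (L.filter (fun x => decide (x < j))).length := by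
    rw [pvLabelN, List.countP_eq_length_filter, hL, List.filter_comm,
        filter_range_lt (n - 1) j (by omega)]
  have hK : ∀ m', m' ≤ L.length →
      ((pvCutsN time_list n)[m']! ≤ j ↔ m' ≤ pvLabelN time_list j) := by
    intro m' hm'
    cases m' with
    | zero => simp [hc0]
    | succ q =>
      have hq : q < L.length := by omega
      rw [hcq q hq, hlab_eq]
      have := sorted_getElem_lt_iff L q j hLs hq
      omega
  constructor
  · intro hlm
    refine ⟨(hK m (by omega)).mpr (by omega), ?_⟩
    by_cases htop : m = L.length
    · rw [htop, hctop]; omega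
    · by_contra hge
      push_neg at hge
      have := (hK (m + 1) (by omega)).mp hge
      omega
  · rintro ⟨h1, h2⟩
    have hml : m ≤ pvLabelN time_list j := (hK m (by omega)).mp h1
    by_cases htop : m = L.length
    · omega
    · have hup : ¬ (m + 1 ≤ pvLabelN time_list j) := by
        intro hc
        have := (hK (m + 1) (by omega)).mpr hc
        omega
      omega

-- scatter characterisation: filtered enumerate = drop/take
lemma filter_enumerate_eq_drop_take {α : Type} (g : Int → Int) (c : Int)
    (lst : List α) (s a b : Nat)
    (hg : ∀ j : Nat, j < s + lst.length → ((g (j : Int) == c) = decide (a ≤ j ∧ j < b))) :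
    (((PySem.List.enumerate lst (s : Int)).map (fun p => (g p.1, p.2))).filter
        (fun p => p.1 == c)).map (·.2)
      = (lst.drop (a - s)).take (b - max a s) := by
  induction lst generalizing s with
  | nil => simp [PySem.List.enumerate_nil]
  | cons x xs ih =>
    rw [PySem.List.enumerate_cons]
    have hxcond : (g (s : Int) == c) = decide (a ≤ s ∧ s < b) := hg s (by simp)
    have hg' : ∀ j : Nat, j < (s + 1) + xs.length → ((g (j : Int) == c) = decide (a ≤ j ∧ j < b)) := by
      intro j hj
      exact hg j (by simp only [List.length_cons] at hj ⊢; omega)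
    have hcast : (s : Int) + 1 = ((s + 1 : Nat) : Int) := by push_cast; ring
    rw [hcast]
    simp only [List.map_cons, List.filter_cons, hxcond]
    by_cases hab : a ≤ s ∧ s < b
    · have hd : decide (a ≤ s ∧ s < b) = true := by simp [hab.1, hab.2]
      rw [hd, if_pos rfl]
      simp only [List.map_cons]
      rw [ih (s + 1) hg']
      have h1 : a - s = 0 := by omega
      have h2 : b - max a s = (b - max a (s + 1)) + 1 := by omega
      have h3 : a - (s + 1) = 0 := by omega
      rw [h1, h2, h3, List.drop_zero, List.drop_zero, List.take_succ_cons]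
    · have hd : decide (a ≤ s ∧ s < b) = false := by simp; omega
      rw [hd, if_neg (by simp)]
      rw [ih (s + 1) hg']
      by_cases hs' : a ≤ s
      · have hb : b ≤ s := by omega
        have h1 : b - max a (s + 1) = 0 := by omega
        have h2 : b - max a s = 0 := by omega
        rw [h1, h2, List.take_zero, List.take_zero]
      · have h1 : a - s = (a - (s + 1)) + 1 := by omega
        have h2 : b - max a s = b - max a (s + 1) := by omega
        rw [h1, h2, List.drop_succ_cons]

-- casted cut list: pvSegs written as a map over segment numbers
lemma segs_cast {α : Type} (cN : List Nat) (lst : List α) :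
    pvSegs (cN.map (fun c : Nat => (c : Int))) lst
      = (List.range (cN.length - 1)).map
          (fun m => (lst.drop cN[m]!).take (cN[m + 1]! - cN[m]!)) := by
  apply List.ext_getElem
  · simp [pvSegs]
  · intro i h1 h2
    simp only [pvSegs, List.getElem_map, List.getElem_zip, List.getElem_tail, List.getElem_range]
    have hi1 : i < cN.length := by simp [pvSegs] at h1; omega
    have hi2 : i + 1 < cN.length := by simp [pvSegs] at h1; omega
    rw [PySem.List.slice_natCast, getElem!_pos cN i hi1, getElem!_pos cN (i + 1) hi2]

-- B's group = pvSegs of A's full cut list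
lemma pvGroup_eq_segs {α : Type} (time_list : List Int) (n : Nat) (lst : List α) :
    pvGroup (pvLabelLoop time_list n).2 (pvLabelLoop time_list n).1 n lst
      = pvSegs (pvCuts (PySem.List.slice time_list none (some (n : Int))) (((n - 1 : Nat)) : Int) ++ [(n : Int)])
          (PySem.List.slice lst none (some (n : Int))) := by
  rw [cutsFull_eq_cast time_list n _ rfl, segs_cast, pvLabelLoop_eq]
  simp only [pvGroup]
  set L := (List.range (n - 1)).filter (pvP time_list) with hLdef
  set lab := (List.range n).map (fun j => (pvLabelN time_list j : Int)) with hlabdef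
  set lst' := PySem.List.slice lst none (some (n : Int)) with hlst'
  have hlen' : lst'.length ≤ n := by rw [hlst', PySem.List.slice_to_natCast]; simp
  have hclen : (pvCutsN time_list n).length - 1 = L.length + 1 := by
    simp [pvCutsN, hLdef]
  rw [hclen]
  have hc1 : ((L.length : Int) + 1) = ((L.length + 1 : Nat) : Int) := by push_cast; ring
  rw [hc1, PySem.List.pyRange_zero_natCast, List.map_map]
  apply List.map_congr_left
  intro m hm
  have hmlt : m < L.length + 1 := List.mem_range.mp hm
  simp only [Function.comp_apply]
  have h2 : (PySem.List.enumerate lst' 0).foldl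
        (fun d p => d.modify (PySem.List.pyGetD lab p.1 0) [] (fun g => g ++ [p.2]))
        PySem.Dict.empty
      = (((PySem.List.enumerate lst' 0).map
            (fun p => (PySem.List.pyGetD lab p.1 0, p.2))).foldl
          (fun d q => d.modify q.1 [] (fun g => g ++ [q.2])) PySem.Dict.empty) :=
    (List.foldl_map (f := fun p : Int × α => (PySem.List.pyGetD lab p.1 0, p.2))
      (g := fun (d : PySem.Dict Int (List α)) (q : Int × α) => d.modify q.1 [] (fun g => g ++ [q.2]))
      (l := PySem.List.enumerate lst') (init := PySem.Dict.empty)).symm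
  rw [h2, PySem.Dict.getD_foldl_modify_append]
  rw [PySem.Dict.getD_empty, List.nil_append]
  have hg : ∀ j : Nat, j < 0 + lst'.length →
      (((fun i => PySem.List.pyGetD lab i 0) (j : Int) == ((m : Nat) : Int))
        = decide ((pvCutsN time_list n)[m]! ≤ j ∧ j < (pvCutsN time_list n)[m + 1]!)) := by
    intro j hj
    have hjn : j < n := by omega
    show (PySem.List.pyGetD lab (j : Int) 0 == (m : Int)) = _
    rw [hlabdef, PySem.List.pyGetD_natCast, PySem.List.getD_map_range _ _ _ _ hjn,
        Bool.beq_eq_decide_eq]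
    exact decide_eq_decide.mpr
      (by rw [Nat.cast_inj]; exact label_iff_cuts time_list n m j hmlt hjn)
  have hfe := filter_enumerate_eq_drop_take (fun i => PySem.List.pyGetD lab i 0)
      ((m : Nat) : Int) lst' 0 ((pvCutsN time_list n)[m]!) ((pvCutsN time_list n)[m + 1]!) hg
  rw [Nat.cast_zero] at hfe
  rw [hfe, Nat.sub_zero, Nat.max_zero]

theorem sep_list_eq (time_list : List Int) (title_list : List String)
    (url_list : List String) (summary_list : List String) :
    sep_list time_list title_list url_list summary_list
      = sep_list_alt time_list title_list url_list summary_list := by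
  rw [sep_list_eq_segs]
  unfold sep_list_alt
  dsimp only
  rw [pvGroup_eq_segs, pvGroup_eq_segs, pvGroup_eq_segs, pvGroup_eq_segs]

-- ===== VERDICT (by name: the statement is the Claim_ definition above) =====
theorem sep_list_spec : Claim_equal_sep_list := by
  intro time_list title_list url_list summary_list _
  exact sep_list_eq time_list title_list url_list summary_list
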